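-- pv_equiv track=rewrite | github.com/ytani01/pi0disp | src/pi0disp/performance_core.py | _compute_bounding_rect
-- ===== SOURCE A (Python) =====
-- from typing import Optional, List, Tuple, Union, Callable, Any
--
-- def _compute_bounding_rect(regions: List[Tuple[int, int, int, int]]) -> Tuple[int, int, int, int]:
--     """複数領域の外接矩形を計算"""
--     if not regions:
--         return (0, 0, 0, 0)
--
--     return (
--         min(r[0] for r in regions),
--         min(r[1] for r in regions),
--         max(r[2] for r in regions),
--         max(r[3] for r in regions)
--     )
-- ===== SOURCE B (Python) =====
-- def _bbox_rec(rs):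
--     """Bounding rect of a nonempty list by divide and conquer."""
--     if len(rs) == 1:
--         return rs[0]
--     mid = len(rs) // 2
--     ax1, ay1, ax2, ay2 = _bbox_rec(rs[:mid])
--     bx1, by1, bx2, by2 = _bbox_rec(rs[mid:])
--     return (min(ax1, bx1), min(ay1, by1), max(ax2, bx2), max(ay2, by2))
--
-- def _compute_bounding_rect(regions):
--     """Divide and conquer: recursively merge the bounding rects of the two halves."""
--     if not regions:
--         return (0, 0, 0, 0)
--     return _bbox_rec(regions)
-- ===== Notes on version B (the rewrite author's own statement) =====
-- stated objective: alternative
-- what changed: Replaces A's four separate linear min/max generator scans with a divide-and-conquer recursion that splits the list in halves and merges the two sub-rectangles (correct because min/max are associative and commutative).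
import Mathlib
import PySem

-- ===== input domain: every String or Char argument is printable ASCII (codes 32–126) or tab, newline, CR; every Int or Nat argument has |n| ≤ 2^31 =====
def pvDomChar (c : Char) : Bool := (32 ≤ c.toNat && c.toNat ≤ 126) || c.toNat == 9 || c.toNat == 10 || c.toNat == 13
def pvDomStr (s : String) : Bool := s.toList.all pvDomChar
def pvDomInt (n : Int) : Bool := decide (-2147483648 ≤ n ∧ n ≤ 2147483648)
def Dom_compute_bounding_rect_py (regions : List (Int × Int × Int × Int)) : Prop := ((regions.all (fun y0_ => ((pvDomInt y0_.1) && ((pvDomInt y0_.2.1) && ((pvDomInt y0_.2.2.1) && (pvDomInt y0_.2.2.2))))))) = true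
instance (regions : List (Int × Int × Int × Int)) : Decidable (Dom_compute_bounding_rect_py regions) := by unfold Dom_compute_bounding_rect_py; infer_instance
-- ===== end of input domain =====

-- B replaces A's four separate min/max scans by a divide-and-conquer recursion that merges the bounding rects of the two halves (alternative algorithm, same O(n) cost).

-- ===== PORT A =====
-- A: guard on empty, then four independent scans (min of x1s, min of y1s, max of x2s, max of y2s).
def compute_bounding_rect_py (regions : List (Int × Int × Int × Int)) : Int × Int × Int × Int :=
  match regions with
  | [] => (0, 0, 0, 0)
  | r :: rs =>
    (rs.foldl (fun m q => min m q.1) r.1,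
     rs.foldl (fun m q => min m q.2.1) r.2.1,
     rs.foldl (fun m q => max m q.2.2.1) r.2.2.1,
     rs.foldl (fun m q => max m q.2.2.2) r.2.2.2)

-- ===== PORT B =====
-- B's recursive helper: split a nonempty list at len//2, merge the two sub-rectangles.
def bbox_rec : List (Int × Int × Int × Int) → Int × Int × Int × Int
  | [] => (0, 0, 0, 0)  -- unreachable: callers only pass nonempty lists (B never calls it on [])
  | [r] => r
  | x :: y :: rest =>
    let mid := (x :: y :: rest).length / 2
    let a := bbox_rec ((x :: y :: rest).take mid)
    let b := bbox_rec ((x :: y :: rest).drop mid)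
    (min a.1 b.1, min a.2.1 b.2.1, max a.2.2.1 b.2.2.1, max a.2.2.2 b.2.2.2)
termination_by l => l.length
decreasing_by
  · simp [List.length_take]; omega
  · simp; omega

def compute_bounding_rect_py_alt (regions : List (Int × Int × Int × Int)) : Int × Int × Int × Int :=
  match regions with
  | [] => (0, 0, 0, 0)
  | _ :: _ => bbox_rec regions

-- ===== PRECONDITION & SPEC =====
def Spec_compute_bounding_rect_py (regions : List (Int × Int × Int × Int)) (out : Int × Int × Int × Int) : Prop := out = compute_bounding_rect_py_alt regions
instance (regions : List (Int × Int × Int × Int)) (out : Int × Int × Int × Int) : Decidable (Spec_compute_bounding_rect_py regions out) := by unfold Spec_compute_bounding_rect_py; infer_instance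

-- ===== CLAIM (what is proved, stated in full; the proofs are below) =====
def Claim_equal_compute_bounding_rect_py : Prop := ∀ (regions : List (Int × Int × Int × Int)), Dom_compute_bounding_rect_py regions → Spec_compute_bounding_rect_py regions (compute_bounding_rect_py regions)

-- ===== LEMMAS AND PROOFS =====

-- foldl-min commutes with a seeded min (min is associative/commutative).
theorem foldl_min_seed {α : Type} (g : α → Int) :
    ∀ (l : List α) (a b : Int),
      l.foldl (fun m q => min m (g q)) (min a b) = min a (l.foldl (fun m q => min m (g q)) b) := by
  intro l
  induction l with
  | nil => intro a b; rfl
  | cons q t ih =>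
    intro a b
    simp only [List.foldl_cons, min_assoc, ih]

theorem foldl_max_seed {α : Type} (g : α → Int) :
    ∀ (l : List α) (a b : Int),
      l.foldl (fun m q => max m (g q)) (max a b) = max a (l.foldl (fun m q => max m (g q)) b) := by
  intro l
  induction l with
  | nil => intro a b; rfl
  | cons q t ih =>
    intro a b
    simp only [List.foldl_cons, max_assoc, ih]

-- A's result on an append of two nonempty lists is the merge of A's results.
theorem A_append (l1 l2 : List (Int × Int × Int × Int)) (h1 : l1 ≠ []) (h2 : l2 ≠ []) :
    compute_bounding_rect_py (l1 ++ l2) =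
      (min (compute_bounding_rect_py l1).1 (compute_bounding_rect_py l2).1,
       min (compute_bounding_rect_py l1).2.1 (compute_bounding_rect_py l2).2.1,
       max (compute_bounding_rect_py l1).2.2.1 (compute_bounding_rect_py l2).2.2.1,
       max (compute_bounding_rect_py l1).2.2.2 (compute_bounding_rect_py l2).2.2.2) := by
  match l1, l2 with
  | r :: rs, s :: ss =>
    simp only [compute_bounding_rect_py, List.cons_append, List.foldl_append, List.foldl_cons]
    rw [foldl_min_seed (fun q => q.1) ss _ s.1,
        foldl_min_seed (fun q => q.2.1) ss _ s.2.1,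
        foldl_max_seed (fun q => q.2.2.1) ss _ s.2.2.1,
        foldl_max_seed (fun q => q.2.2.2) ss _ s.2.2.2]

-- B's divide-and-conquer equals A's four scans on every nonempty list.
theorem bbox_rec_eq : ∀ (l : List (Int × Int × Int × Int)), l ≠ [] →
    bbox_rec l = compute_bounding_rect_py l := by
  intro l
  match l with
  | [] => intro h; exact absurd rfl h
  | [r] =>
    intro _
    simp [bbox_rec, compute_bounding_rect_py]
  | x :: y :: rest =>
    intro _
    have hmidpos : 1 ≤ (x :: y :: rest).length / 2 := by simp; omega
    have hmidlt : (x :: y :: rest).length / 2 < (x :: y :: rest).length := by simp; omega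
    have ht : (x :: y :: rest).take ((x :: y :: rest).length / 2) ≠ [] := by
      intro h
      have := congrArg List.length h
      simp [List.length_take] at this
    have hd : (x :: y :: rest).drop ((x :: y :: rest).length / 2) ≠ [] := by
      intro h
      have := congrArg List.length h
      simp at this
      omega
    have iht := bbox_rec_eq ((x :: y :: rest).take ((x :: y :: rest).length / 2)) ht
    have ihd := bbox_rec_eq ((x :: y :: rest).drop ((x :: y :: rest).length / 2)) hd
    rw [bbox_rec]
    simp only [iht, ihd]
    rw [show (x :: y :: rest) = (x :: y :: rest).take ((x :: y :: rest).length / 2) ++ (x :: y :: rest).drop ((x :: y :: rest).length / 2) from (List.take_append_drop _ _).symm]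
    rw [A_append _ _ ht hd]
    simp [List.take_append_drop]
termination_by l => l.length
decreasing_by
  · simp [List.length_take]; omega
  · simp; omega

-- ===== VERDICT (by name: the statement is the Claim_ definition above) =====
theorem compute_bounding_rect_py_spec : Claim_equal_compute_bounding_rect_py := by
  intro regions _
  unfold Spec_compute_bounding_rect_py compute_bounding_rect_py_alt
  match regions with
  | [] => rfl
  | r :: rs => exact (bbox_rec_eq (r :: rs) (by simp)).symm
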